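-- pv_equiv track=rewrite | github.com/Dwittyy/AdventOfCode | Day 16/Day 16b.py | FindOptions
-- ===== SOURCE A (Python) =====
-- def IsValid(num,conditions):
--     for spans in conditions.values():
--         for span in spans:
--             if span[0] <= num <= span[1]:
--                 return True
--     return False
--
-- def ValidFields(num,conditions):
--     validfields = []
--     for field in conditions:
--         spans = conditions[field]
--         if IsValid(num,{field:spans}):
--             validfields.append(field)
--     return validfields
--
-- def FindOptions(tickets,fields):
--     alloptions = dict()
--
--     for i in range(20):
--         options = set(fields.keys())
--         for ticket in tickets:
--             for index,num in enumerate(ticket):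
--                 if index != i:
--                     continue
--                 num = int(num)
--                 vfields = set(ValidFields(num,fields))
--                 options = options.intersection(vfields)
--         alloptions[i] = options
--     return alloptions
-- ===== SOURCE B (Python) =====
-- def FindOptions(tickets, fields):
--     # Per column: keep each field iff every ticket value present at that column
--     # fits one of the field's spans (instead of per-number ValidFields + set
--     # intersection as in A).
--     alloptions = dict()
--     for i in range(20):
--         column = [ticket[i] for ticket in tickets if len(ticket) > i]
--         alloptions[i] = {field for field, spans in fields.items()
--                          if all(any(span[0] <= int(num) <= span[1] for span in spans)
--                                 for num in column)}
--     return alloptions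
-- ===== Notes on version B (the rewrite author's own statement) =====
-- stated objective: faster
-- what changed: B gathers each column once and keeps a field iff a short-circuiting all/any test passes over that column, instead of A's per-number ValidFields list rebuild (a full scan of all fields per number) intersected into a shrinking set.
import Mathlib
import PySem

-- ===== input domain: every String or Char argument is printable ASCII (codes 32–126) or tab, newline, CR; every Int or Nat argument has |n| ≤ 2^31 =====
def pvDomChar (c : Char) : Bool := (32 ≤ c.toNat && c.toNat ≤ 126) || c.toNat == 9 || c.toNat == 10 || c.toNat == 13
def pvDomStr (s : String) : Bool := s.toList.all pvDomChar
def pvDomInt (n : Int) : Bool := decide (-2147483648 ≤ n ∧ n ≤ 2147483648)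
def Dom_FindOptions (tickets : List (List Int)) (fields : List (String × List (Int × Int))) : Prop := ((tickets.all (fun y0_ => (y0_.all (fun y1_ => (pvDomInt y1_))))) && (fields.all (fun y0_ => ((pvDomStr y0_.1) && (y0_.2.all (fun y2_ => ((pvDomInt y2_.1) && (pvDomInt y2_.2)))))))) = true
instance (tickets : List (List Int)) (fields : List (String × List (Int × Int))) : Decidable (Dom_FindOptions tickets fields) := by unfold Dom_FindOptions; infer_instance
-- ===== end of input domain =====

-- B gathers each column once and keeps a field iff a short-circuiting all/any test
-- passes over that column, instead of A's per-number ValidFields rebuild intersected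
-- into a shrinking set.

-- ===== PORT A =====
def IsValidA (num : Int) (conditions : PySem.Dict String (List (Int × Int))) : Bool :=
  conditions.values.any (fun spans => spans.any (fun span => span.1 ≤ num && num ≤ span.2))

def ValidFieldsA (num : Int) (conditions : PySem.Dict String (List (Int × Int))) : List String :=
  conditions.keys.foldl (fun validfields field =>
    let spans := conditions.getD field []
    if IsValidA num ((PySem.Dict.empty).insert field spans) then validfields ++ [field]
    else validfields) []

def FindOptions (tickets : List (List Int)) (fields : List (String × List (Int × Int))) : List (Int × List String) :=
  let conditions := PySem.Dict.ofList fields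
  let alloptions : PySem.Dict Int (PySem.Set String) :=
    (PySem.List.pyRange 0 20).foldl (fun alloptions i =>
      let options := PySem.Set.ofList conditions.keys
      let options := tickets.foldl (fun options ticket =>
        -- enumerate(ticket): zipIdx pairs each num with its index
        (ticket.zipIdx).foldl (fun options p =>
          if (p.2 : Int) ≠ i then options
          else
            -- int(num) is the identity on an int
            let vfields := PySem.Set.ofList (ValidFieldsA p.1 conditions)
            PySem.Set.inter options vfields) options) options
      alloptions.insert i options) PySem.Dict.empty
  alloptions.items

-- ===== PORT B =====
def colAt (tickets : List (List Int)) (i : Int) : List Int :=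
  -- [ticket[i] for ticket in tickets if len(ticket) > i]; the guard keeps i in range
  (tickets.filter (fun ticket => i < (ticket.length : Int))).map
    (fun ticket => PySem.List.pyGetD ticket i 0)

def fieldOK (spans : List (Int × Int)) (column : List Int) : Bool :=
  -- int(num) is the identity on an int
  column.all (fun num => spans.any (fun span => span.1 ≤ num && num ≤ span.2))

def FindOptions_alt (tickets : List (List Int)) (fields : List (String × List (Int × Int))) : List (Int × List String) :=
  let d := PySem.Dict.ofList fields
  (PySem.List.pyRange 0 20).map (fun i =>
    let column := colAt tickets i
    (i, PySem.Set.ofList ((d.items.filter (fun p => fieldOK p.2 column)).map (fun p => p.1))))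

-- ===== PRECONDITION & SPEC =====
def Spec_FindOptions (tickets : List (List Int)) (fields : List (String × List (Int × Int))) (out : List (Int × List String)) : Prop := out = FindOptions_alt tickets fields
instance (tickets : List (List Int)) (fields : List (String × List (Int × Int))) (out : List (Int × List String)) : Decidable (Spec_FindOptions tickets fields out) := by unfold Spec_FindOptions; infer_instance

-- ===== CLAIM (what is proved, stated in full; the proofs are below) =====
def Claim_equal_FindOptions : Prop := ∀ (tickets : List (List Int)) (fields : List (String × List (Int × Int))), Dom_FindOptions tickets fields → Spec_FindOptions tickets fields (FindOptions tickets fields)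

-- ===== LEMMAS AND PROOFS =====

-- the span test both programs share
def spanOK (spans : List (Int × Int)) (num : Int) : Bool :=
  spans.any (fun span => span.1 ≤ num && num ≤ span.2)

theorem isValidA_singleton (num : Int) (f : String) (spans : List (Int × Int)) :
    IsValidA num ((PySem.Dict.empty).insert f spans) = spanOK spans num := by
  rw [IsValidA, PySem.Dict.values,
    PySem.Dict.items_insert_of_not_contains _ _ (PySem.Dict.contains_empty f)]
  simp [spanOK, PySem.Dict.empty]

theorem validFieldsA_eq_filter (num : Int) (d : PySem.Dict String (List (Int × Int))) :
    ValidFieldsA num d = d.keys.filter (fun f => spanOK (d.getD f []) num) := by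
  simp only [ValidFieldsA, isValidA_singleton]
  simpa using PySem.List.foldl_append_if (fun f => spanOK (d.getD f []) num) id d.keys []

-- the fresh-key fold that builds A's result dict
theorem items_foldl_insert_fresh (v : Int → PySem.Set String) :
    ∀ (l : List Int) (d : PySem.Dict Int (PySem.Set String)), l.Nodup →
    (∀ i ∈ l, d.contains i = false) →
    (l.foldl (fun d i => d.insert i (v i)) d).items = d.items ++ l.map (fun i => (i, v i)) := by
  intro l
  induction l with
  | nil => intros; simp
  | cons i l ih =>
    intro d hnd hfree
    simp only [List.foldl_cons, List.map_cons]
    rw [ih _ (by simpa using hnd.of_cons) ?later]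
    · rw [PySem.Dict.items_insert_of_not_contains _ _ (hfree i (by simp))]
      simp
    case later =>
      intro j hj
      rw [PySem.Dict.contains_insert]
      have : j ≠ i := by rintro rfl; exact (List.nodup_cons.mp hnd).1 hj
      simp [this, hfree j (by simp [hj])]

-- A's enumerate loop is a no-op once every index is past the target column
theorem inner_none (d : PySem.Dict String (List (Int × Int))) (n : Nat) :
    ∀ (t : List Int) (k : Nat), n < k → ∀ opts,
    (t.zipIdx k).foldl (fun options p =>
      if (p.2 : Int) ≠ ((n : Nat) : Int) then options
      else PySem.Set.inter options (PySem.Set.ofList (ValidFieldsA p.1 d))) opts = opts := by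
  intro t
  induction t with
  | nil => intros; simp
  | cons x xs ih =>
    intro k hk opts
    rw [List.zipIdx_cons, List.foldl_cons]
    have : ((k : Int) ≠ ((n : Nat) : Int)) := by exact_mod_cast Nat.ne_of_gt hk
    rw [if_pos this]
    exact ih (k+1) (Nat.lt_succ_of_lt hk) opts

-- A's enumerate loop picks out exactly the value at the target column, if any
theorem inner_eq (d : PySem.Dict String (List (Int × Int))) (n : Nat) :
    ∀ (t : List Int) (k : Nat), k ≤ n → ∀ opts,
    (t.zipIdx k).foldl (fun options p =>
      if (p.2 : Int) ≠ ((n : Nat) : Int) then options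
      else PySem.Set.inter options (PySem.Set.ofList (ValidFieldsA p.1 d))) opts =
    if n - k < t.length then
      PySem.Set.inter opts (PySem.Set.ofList (ValidFieldsA (t.getD (n - k) 0) d))
    else opts := by
  intro t
  induction t with
  | nil => intros; simp
  | cons x xs ih =>
    intro k hk opts
    rw [List.zipIdx_cons, List.foldl_cons]
    by_cases h : k = n
    · subst h
      rw [if_neg (by simp)]
      rw [inner_none d k xs (k+1) (Nat.lt_succ_self k)]
      simp
    · have hkn : k < n := lt_of_le_of_ne hk h
      rw [if_pos (by exact_mod_cast h)]
      rw [ih (k+1) hkn]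
      have h1 : n - k = (n - (k+1)) + 1 := by omega
      by_cases h2 : n - (k+1) < xs.length
      · rw [if_pos h2, if_pos (by simp; omega), h1]
        simp
      · rw [if_neg h2, if_neg (by simp; omega)]

-- a fold of conditional filters is one filter by the conjunction
theorem foldl_filter_if {T : Type} (c : T → Bool) (q : T → String → Bool) :
    ∀ (ts : List T) (K : List String),
    ts.foldl (fun s t => if c t then List.filter (fun x => q t x) s else s) K
    = K.filter (fun f => ts.all (fun t => !c t || q t f)) := by
  intro ts
  induction ts with
  | nil => intro K; simp
  | cons t ts ih =>
    intro K
    simp only [List.foldl_cons, List.all_cons]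
    by_cases h : c t = true
    · rw [if_pos h, ih, List.filter_filter]
      apply List.filter_congr; intro f _
      simp [h, Bool.and_comm]
    · rw [if_neg h, ih]
      apply List.filter_congr; intro f _
      simp [show c t = false from by simpa using h]

-- filtering items by a span predicate = filtering keys through the lookup
theorem filter_items_map :
    ∀ (L : List (String × List (Int × Int))) (g : String → List (Int × Int))
      (P : List (Int × Int) → Bool), (∀ p ∈ L, g p.1 = p.2) →
    (L.filter (fun p => P p.2)).map (fun p => p.1)
      = (L.map (fun p => p.1)).filter (fun f => P (g f)) := by
  intro L
  induction L with
  | nil => intros; simp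
  | cons p L ih =>
    intro g P h
    have hp : g p.1 = p.2 := h p (by simp)
    simp only [List.map_cons, List.filter_cons, hp]
    by_cases hP : P p.2 = true
    · simp [hP, ih g P (fun q hq => h q (by simp [hq]))]
    · simp [ih g P (fun q hq => h q (by simp [hq])), show P p.2 = false from by simpa using hP]

-- the two per-column values coincide
theorem perI (tickets : List (List Int)) (fields : List (String × List (Int × Int))) (n : Nat) :
    tickets.foldl (fun options ticket =>
      (ticket.zipIdx).foldl (fun options p =>
        if (p.2 : Int) ≠ ((n : Nat) : Int) then options
        else PySem.Set.inter options (PySem.Set.ofList (ValidFieldsA p.1 (PySem.Dict.ofList fields))))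
        options) (PySem.Set.ofList (PySem.Dict.ofList fields).keys)
    = PySem.Set.ofList (((PySem.Dict.ofList fields).items.filter
        (fun p => fieldOK p.2 (colAt tickets ((n : Nat) : Int)))).map (fun p => p.1)) := by
  have hnd : (PySem.Dict.ofList fields).keys.Nodup := PySem.Dict.nodup_keys_ofList fields
  set d := PySem.Dict.ofList fields with hd
  rw [List.foldl_ext (g := fun options ticket =>
        if decide (n < ticket.length) then
          List.filter (fun x =>
            (PySem.Set.ofList (ValidFieldsA (ticket.getD n 0) d)).contains x) options
        else options)
      (H := ?_)]
  · rw [foldl_filter_if, PySem.Set.ofList_eq_self_of_nodup _ hnd]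
    have hcons : ∀ p ∈ d.items, (fun f => d.getD f []) p.1 = p.2 := by
      intro p hp
      exact PySem.Dict.getD_of_mem_items d (by simpa using hp) hnd []
    rw [filter_items_map d.items (fun f => d.getD f [])
      (fun spans => fieldOK spans (colAt tickets ((n : Nat) : Int))) hcons]
    rw [PySem.Set.ofList_eq_self_of_nodup _ (by exact List.Nodup.filter _ hnd)]
    show _ = List.filter _ d.keys
    apply List.filter_congr
    intro f hf
    simp only [fieldOK, colAt, List.all_map, List.all_filter, Function.comp]
    congr 1
    funext t
    simp only [Nat.cast_lt, PySem.List.pyGetD_natCast]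
    congr 1
    rw [validFieldsA_eq_filter, PySem.Set.ofList_eq_self_of_nodup _ (List.Nodup.filter _ hnd)]
    by_cases hb : ((d.getD f []).any fun span =>
        decide (span.1 ≤ t[n]?.getD 0) && decide (t[n]?.getD 0 ≤ span.2)) = true
    · simp [PySem.Set.contains, List.mem_filter, hf, spanOK, hb]
    · simp [PySem.Set.contains, List.mem_filter, spanOK, hb]
  · intro opts t _
    rw [inner_eq d n t 0 (Nat.zero_le n) opts]
    simp only [Nat.sub_zero]
    by_cases h : n < t.length
    · rw [if_pos h, if_pos (by simpa using h)]
      rfl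
    · rw [if_neg h, if_neg (by simpa using h)]

-- ===== VERDICT (by name: the statement is the Claim_ definition above) =====
theorem FindOptions_spec : Claim_equal_FindOptions := by
  intro tickets fields _
  show FindOptions tickets fields = FindOptions_alt tickets fields
  simp only [FindOptions, FindOptions_alt]
  refine (items_foldl_insert_fresh _ (PySem.List.pyRange 0 20) PySem.Dict.empty
      (by decide) (fun i _ => PySem.Dict.contains_empty i)).trans ?_
  have hempty : (PySem.Dict.empty : PySem.Dict Int (PySem.Set String)).items = [] := rfl
  rw [hempty, List.nil_append]
  apply List.map_congr_left
  intro i hi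
  have h0 : 0 ≤ i := (PySem.List.mem_pyRange_one.mp hi).1
  have hin : ((i.toNat : Nat) : Int) = i := Int.toNat_of_nonneg h0
  rw [← hin]
  exact congrArg (fun s => (((i.toNat : Nat) : Int), s)) (perI tickets fields i.toNat)
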